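-- pv_equiv track=rewrite | github.com/jonathancychow/project_euler | PrimeLib.py | chekcUniquePrimeFactor
-- ===== SOURCE A (Python) =====
-- def chekcUniquePrimeFactor(list):
--     j = 0
--     distinct_prime_factor=[]
--     distinct_prime_factor.append(list[0])
--     for i in range(0,len(list),1):
--         if len(list)>1 and i!=0:
--             if list[i] == list[i-1]:
--                 distinct_prime_factor[j] = distinct_prime_factor[j] * list[i]
--             else:
--                 j += 1
--                 distinct_prime_factor.append(list[i])
--     return distinct_prime_factor
-- ===== SOURCE B (Python) =====
-- def chekcUniquePrimeFactor(list):
--     # Scan each maximal run of equal values; emit run-head ** run-length.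
--     out = []
--     i = 0
--     n = len(list)
--     while i < n:
--         x = list[i]
--         k = i + 1
--         while k < n and list[k] == x:
--             k += 1
--         out.append(x ** (k - i))
--         i = k
--     return out
-- ===== Notes on version B (the rewrite author's own statement) =====
-- stated objective: alternative
-- what changed: B scans each maximal run of equal values with an index pair and emits the run head raised to the run length, instead of A's per-element loop that compares each element with its predecessor and multiplies an in-place slot of the growing output list.
import Mathlib
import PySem

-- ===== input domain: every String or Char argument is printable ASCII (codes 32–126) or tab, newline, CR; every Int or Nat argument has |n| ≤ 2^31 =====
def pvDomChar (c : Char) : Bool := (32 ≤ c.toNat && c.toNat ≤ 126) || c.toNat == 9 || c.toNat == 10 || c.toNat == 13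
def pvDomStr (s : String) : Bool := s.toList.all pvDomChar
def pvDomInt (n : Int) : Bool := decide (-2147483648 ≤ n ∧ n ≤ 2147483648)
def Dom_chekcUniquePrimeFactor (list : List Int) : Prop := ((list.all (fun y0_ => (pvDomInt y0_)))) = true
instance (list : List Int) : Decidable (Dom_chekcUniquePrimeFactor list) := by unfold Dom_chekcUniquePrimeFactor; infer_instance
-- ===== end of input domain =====

-- B scans each maximal run of equal values and emits the run head raised to the run length,
-- instead of A's per-element loop with an in-place multiplied output slot (objective: alternative).

-- ===== PORT A =====
-- one iteration of A's 'for i in range(0, len(list), 1)' body over the state (j, distinct_prime_factor)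
def aStep (list : List Int) (st : Int × List Int) (i : Int) : Int × List Int :=
  if list.length > 1 ∧ i ≠ 0 then
    if PySem.List.pyGetD list i 0 = PySem.List.pyGetD list (i - 1) 0 then
      -- distinct_prime_factor[j] = distinct_prime_factor[j] * list[i]
      (st.1, PySem.List.pySetD st.2 st.1 (PySem.List.pyGetD st.2 st.1 0 * PySem.List.pyGetD list i 0))
    else
      (st.1 + 1, st.2 ++ [PySem.List.pyGetD list i 0])
  else st

def chekcUniquePrimeFactor (list : List Int) : List Int :=
  -- the initial append of the first element raises IndexError on the empty list; Pre_ excludes it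
  ((PySem.List.pyRange 0 (list.length : Int) 1).foldl (aStep list)
      (0, [PySem.List.pyGetD list 0 0])).2

-- ===== PORT B =====
-- Source B's inner 'while k < n and list[k] == x: k += 1' (fuel = list length bounds the iterations)
def altInner (list : List Int) (x : Int) : Nat → Int → Int
  | 0, k => k
  | fuel + 1, k =>
    if k < (list.length : Int) ∧ PySem.List.pyGetD list k 0 = x then
      altInner list x fuel (k + 1)
    else k

-- Source B's outer 'while i < n' loop: emit x ** (k - i), continue at i = k
def altOuter (list : List Int) : Nat → Int → List Int
  | 0, _ => []
  | fuel + 1, i =>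
    if i < (list.length : Int) then
      let x := PySem.List.pyGetD list i 0
      let k := altInner list x list.length (i + 1)
      x ^ (k - i).toNat :: altOuter list fuel k
    else []

def chekcUniquePrimeFactor_alt (list : List Int) : List Int := altOuter list list.length 0

-- ===== PRECONDITION & SPEC =====
-- Pre_ excludes only the empty list, on which A raises IndexError reading the first element.
def Pre_chekcUniquePrimeFactor (list : List Int) : Prop := list ≠ []
instance (list : List Int) : Decidable (Pre_chekcUniquePrimeFactor list) := by
  unfold Pre_chekcUniquePrimeFactor; infer_instance

def pvWitness_chekcUniquePrimeFactor : List Int := [2, 2, 3, 5, 5, 5]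

def Spec_chekcUniquePrimeFactor (list : List Int) (out : List Int) : Prop := out = chekcUniquePrimeFactor_alt list
instance (list : List Int) (out : List Int) : Decidable (Spec_chekcUniquePrimeFactor list out) := by unfold Spec_chekcUniquePrimeFactor; infer_instance

-- ===== CLAIM (what is proved, stated in full; the proofs are below) =====
def Claim_equal_chekcUniquePrimeFactor : Prop := ∀ (list : List Int), Dom_chekcUniquePrimeFactor list → Pre_chekcUniquePrimeFactor list → Spec_chekcUniquePrimeFactor list (chekcUniquePrimeFactor list)

-- ===== LEMMAS AND PROOFS =====

-- length of the leading run of elements equal to x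
def bRun (x : Int) : List Int → Nat
  | [] => 0
  | y :: ys => if y = x then bRun x ys + 1 else 0

-- canonical run-splitting recursion (fueled), the common target of both ports
def altLoop : Nat → List Int → List Int
  | 0, _ => []
  | _, [] => []
  | fuel + 1, x :: rest =>
    let k := bRun x rest
    x ^ (k + 1) :: altLoop fuel (rest.drop k)

def runSplit (xs : List Int) : List Int := altLoop xs.length xs

-- characterisation of what A's loop appends/multiplies after the current run product p,
-- with prev = the element just before the remaining suffix
def gRun (prev p : Int) : List Int → List Int
  | [] => [p]
  | c :: cs => if c = prev then gRun c (p * c) cs else p :: gRun c c cs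

lemma aStep_zero (list : List Int) (st : Int × List Int) : aStep list st 0 = st := by
  simp [aStep]

lemma bRun_le (x : Int) : ∀ ys : List Int, bRun x ys ≤ ys.length := by
  intro ys
  induction ys generalizing x with
  | nil => simp [bRun]
  | cons y ys ih =>
    by_cases h : y = x
    · simp [bRun, h]; exact ih x
    · simp [bRun, h]

lemma altLoop_fuel : ∀ (m n : Nat) (xs : List Int), xs.length ≤ m → xs.length ≤ n →
    altLoop m xs = altLoop n xs := by
  intro m
  induction m with
  | zero =>
    intro n xs hm _
    have : xs = [] := List.eq_nil_of_length_eq_zero (by omega)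
    subst this
    cases n <;> rfl
  | succ m ih =>
    intro n xs hm hn
    match xs, n with
    | [], n => cases n <;> rfl
    | x :: rest, 0 => simp at hn
    | x :: rest, n + 1 =>
      simp only [altLoop]
      congr 1
      have hk : bRun x rest ≤ rest.length := bRun_le x rest
      exact ih n (rest.drop (bRun x rest)) (by simp at hm ⊢; omega) (by simp at hn ⊢; omega)

lemma runSplit_nil : runSplit [] = [] := rfl

lemma runSplit_cons (x : Int) (rest : List Int) :
    runSplit (x :: rest)
      = x ^ (bRun x rest + 1) :: runSplit (rest.drop (bRun x rest)) := by
  unfold runSplit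
  simp only [List.length_cons, altLoop]
  congr 1
  exact altLoop_fuel rest.length (rest.drop (bRun x rest)).length _ (by simp) (le_refl _)

-- B's inner while: starting at index k with fuel ≥ n - k, it stops at k + (leading run of x in drop k)
lemma altInner_eq (list : List Int) (x : Int) :
    ∀ (fuel k : Nat), list.length ≤ k + fuel →
    altInner list x fuel (k : Int) = ((k + bRun x (list.drop k) : Nat) : Int) := by
  intro fuel
  induction fuel with
  | zero =>
    intro k hk
    have hd : list.drop k = [] := List.drop_eq_nil_of_le (by omega)
    simp [altInner, hd, bRun]
  | succ fuel ih =>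
    intro k hk
    by_cases hlt : k < list.length
    · have hdrop : list.drop k = list[k] :: list.drop (k + 1) := List.drop_eq_getElem_cons hlt
      have hget : PySem.List.pyGetD list (k : Int) 0 = list[k] := by
        rw [PySem.List.pyGetD_natCast]; exact List.getD_eq_getElem list 0 hlt
      by_cases hx : list[k] = x
      · have : altInner list x (fuel + 1) (k : Int) = altInner list x fuel ((k : Int) + 1) := by
          simp only [altInner]
          rw [if_pos ⟨by exact_mod_cast hlt, by rw [hget, hx]⟩]
        rw [this, show ((k : Int) + 1) = ((k + 1 : Nat) : Int) from by omega,
          ih (k + 1) (by omega), hdrop]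
        simp [bRun, hx]
        omega
      · simp only [altInner]
        rw [if_neg (by rw [hget]; tauto), hdrop]
        simp [bRun, hx]
    · have hd : list.drop k = [] := List.drop_eq_nil_of_le (by omega)
      simp only [altInner]
      rw [if_neg (by rw [not_and_or]; left; omega), hd]
      simp [bRun]

-- B's outer while from index i equals the canonical run split of the suffix from i
lemma altOuter_eq (list : List Int) :
    ∀ (fuel i : Nat), list.length ≤ i + fuel →
    altOuter list fuel (i : Int) = runSplit (list.drop i) := by
  intro fuel
  induction fuel with
  | zero =>
    intro i hi
    have hd : list.drop i = [] := List.drop_eq_nil_of_le (by omega)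
    simp [altOuter, hd, runSplit_nil]
  | succ fuel ih =>
    intro i hi
    by_cases hlt : i < list.length
    · have hdrop : list.drop i = list[i] :: list.drop (i + 1) := List.drop_eq_getElem_cons hlt
      have hget : PySem.List.pyGetD list (i : Int) 0 = list[i] := by
        rw [PySem.List.pyGetD_natCast]; exact List.getD_eq_getElem list 0 hlt
      have hr : bRun list[i] (list.drop (i + 1)) ≤ (list.drop (i + 1)).length :=
        bRun_le _ _
      simp only [altOuter]
      rw [if_pos (by exact_mod_cast hlt), hget,
        show ((i : Int) + 1) = ((i + 1 : Nat) : Int) from by omega,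
        altInner_eq list list[i] list.length (i + 1) (by omega)]
      set r := bRun list[i] (list.drop (i + 1)) with hrdef
      rw [show (((i + 1 + r : Nat) : Int) - (i : Int)).toNat = r + 1 from by omega,
        ih (i + 1 + r) (by simp at hr; omega)]
      rw [hdrop, runSplit_cons, ← hrdef]
      congr 2
      rw [List.drop_drop]
    · have hd : list.drop i = [] := List.drop_eq_nil_of_le (by omega)
      simp only [altOuter]
      rw [if_neg (by omega), hd, runSplit_nil]

-- A's fold from index a (1 ≤ a ≤ len) with state (j, done ++ [p]), j = done.length
lemma foldA (list : List Int) :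
    ∀ (d a : Nat), a + d = list.length → 1 ≤ a →
    ∀ (done : List Int) (p : Int),
    ((PySem.List.pyRange (a : Int) (list.length : Int) 1).foldl (aStep list)
        ((done.length : Int), done ++ [p])).2
      = done ++ gRun (list.getD (a - 1) 0) p (list.drop a) := by
  intro d
  induction d with
  | zero =>
    intro a ha h1 done p
    have he : (list.length : Int) ≤ (a : Int) := by omega
    rw [PySem.List.pyRange_one_eq_nil he]
    have hd : list.drop a = [] := by
      apply List.drop_eq_nil_of_le; omega
    simp [hd, gRun]
  | succ d ih =>
    intro a ha h1 done p
    have hlt : a < list.length := by omega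
    have hlen : 1 < list.length := by omega
    rw [PySem.List.pyRange_one_cons (by exact_mod_cast hlt), List.foldl_cons]
    have hdrop : list.drop a = list[a] :: list.drop (a + 1) :=
      List.drop_eq_getElem_cons hlt
    have hgetD : list.getD a 0 = list[a] := List.getD_eq_getElem list 0 hlt
    have hstep1 : PySem.List.pyGetD list (a : Int) 0 = list[a] := by
      rw [PySem.List.pyGetD_natCast]; exact hgetD
    have hcast : ((a : Int) - 1) = ((a - 1 : Nat) : Int) := by omega
    have hstep2 : PySem.List.pyGetD list ((a : Int) - 1) 0 = list.getD (a - 1) 0 := by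
      rw [hcast]; simp [PySem.List.pyGetD_natCast]
    by_cases hc : list[a] = list.getD (a - 1) 0
    · -- run continues: multiply the last slot
      have hstep : aStep list ((done.length : Int), done ++ [p]) (a : Int)
          = ((done.length : Int), done ++ [p * list[a]]) := by
        simp only [aStep, hstep1, hstep2]
        rw [if_pos ⟨hlen, by omega⟩, if_pos hc]
        simp
      rw [hstep]
      have hih := ih (a + 1) (by omega) (by omega) done (p * list[a])
      rw [show ((a + 1 : Nat) : Int) = (a : Int) + 1 from by omega] at hih
      rw [hih]
      simp only [Nat.add_sub_cancel, hdrop, gRun, hgetD]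
      rw [if_pos hc]
    · -- new run: j += 1, append list[a]
      have hstep : aStep list ((done.length : Int), done ++ [p]) (a : Int)
          = (((done ++ [p]).length : Int), (done ++ [p]) ++ [list[a]]) := by
        simp only [aStep, hstep1, hstep2]
        rw [if_pos ⟨hlen, by omega⟩, if_neg hc]
        simp
      rw [hstep]
      have hih := ih (a + 1) (by omega) (by omega) (done ++ [p]) (list[a])
      rw [show ((a + 1 : Nat) : Int) = (a : Int) + 1 from by omega] at hih
      rw [hih]
      simp only [Nat.add_sub_cancel, hdrop, gRun, hgetD]
      rw [if_neg hc]
      simp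

-- gRun equals the canonical run-splitting output
lemma gRun_alt : ∀ (n : Nat) (xs : List Int), xs.length ≤ n → ∀ (x p : Int),
    gRun x p xs = (p * x ^ bRun x xs) :: runSplit (xs.drop (bRun x xs)) := by
  intro n
  induction n with
  | zero =>
    intro xs hxs x p
    have : xs = [] := List.eq_nil_of_length_eq_zero (by omega)
    subst this
    simp [gRun, bRun, runSplit_nil]
  | succ n ih =>
    intro xs hxs x p
    cases xs with
    | nil => simp [gRun, bRun, runSplit_nil]
    | cons c cs =>
      by_cases hc : c = x
      · subst hc
        have h1 : gRun c p (c :: cs) = gRun c (p * c) cs := by simp [gRun]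
        have h2 : bRun c (c :: cs) = bRun c cs + 1 := by simp [bRun]
        rw [h1, h2, ih cs (by simp at hxs; omega) c (p * c)]
        simp only [List.drop_succ_cons]
        congr 1
        rw [pow_succ]; ring
      · have h1 : gRun x p (c :: cs) = p :: gRun c c cs := by simp [gRun, hc]
        have h2 : bRun x (c :: cs) = 0 := by simp [bRun, hc]
        rw [h1, h2, ih cs (by simp at hxs; omega) c c]
        simp only [List.drop_zero, pow_zero, mul_one]
        rw [runSplit_cons]
        congr 1
        rw [pow_succ, mul_comm]

-- ===== VERDICT (by name: the statement is the Claim_ definition above) =====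
theorem chekcUniquePrimeFactor_spec : Claim_equal_chekcUniquePrimeFactor := by
  intro list _ hpre
  unfold Spec_chekcUniquePrimeFactor
  match list, hpre with
  | x :: xs, _ =>
    unfold chekcUniquePrimeFactor
    have hn : 0 < ((x :: xs).length : Int) := by simp
    rw [PySem.List.pyRange_one_cons hn, List.foldl_cons, aStep_zero]
    have h0 : PySem.List.pyGetD (x :: xs) 0 0 = x := PySem.List.pyGetD_zero_cons x xs 0
    have hfold := foldA (x :: xs) xs.length 1 (by simp; omega) (by omega) [] x
    simp only [List.length_nil, Int.natCast_zero, List.nil_append, Nat.cast_one] at hfold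
    rw [show (0 : Int) + 1 = 1 from by omega, h0, hfold]
    have hgd : (x :: xs).getD (1 - 1) 0 = x := by simp
    have hdr : (x :: xs).drop 1 = xs := by simp
    rw [hgd, hdr, gRun_alt xs.length xs (le_refl _) x x]
    have halt : chekcUniquePrimeFactor_alt (x :: xs) = runSplit (x :: xs) := by
      unfold chekcUniquePrimeFactor_alt
      have := altOuter_eq (x :: xs) (x :: xs).length 0 (by omega)
      simpa using this
    rw [halt, runSplit_cons]
    congr 1
    rw [pow_succ, mul_comm]
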